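-- pv_equiv track=rewrite | github.com/zhixiaobai/Python-zhihuishu | 知到.py | generateWatchPoint
-- ===== SOURCE A (Python) =====
-- def learningTimeRecord(tolStudyTime, watchPointPost):
--     t = int(tolStudyTime / 5) + 2
--     if watchPointPost is None or watchPointPost == "":
--         e = "0,1,"
--     else:
--         e = watchPointPost + ","
--     return t, e
--
-- def generateWatchPoint(videoSec):
--     tolStudyTime = 0
--     watchPointPost = ""
--     for i in range(0, videoSec):
--         if i % 2 == 0:
--             t, e = learningTimeRecord(tolStudyTime, watchPointPost)
--             watchPointPost = e + str(t)
--         if i % 5 == 0: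
--             tolStudyTime += 5
--     return watchPointPost
-- ===== SOURCE B (Python) =====
-- def generateWatchPoint(videoSec):
--     pts = [("2" if i == 0 else str((i - 1) // 5 + 3)) for i in range(0, videoSec, 2)]
--     return "0,1," + ",".join(pts) if pts else ""
-- ===== Notes on version B (the rewrite author's own statement) =====
-- stated objective: faster
-- what changed: Replaces the loop's two running accumulators (a study-time counter threaded through a helper and a string grown by repeated concatenation) with a closed-form value per even index and a single join over the even indices.
import Mathlib
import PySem

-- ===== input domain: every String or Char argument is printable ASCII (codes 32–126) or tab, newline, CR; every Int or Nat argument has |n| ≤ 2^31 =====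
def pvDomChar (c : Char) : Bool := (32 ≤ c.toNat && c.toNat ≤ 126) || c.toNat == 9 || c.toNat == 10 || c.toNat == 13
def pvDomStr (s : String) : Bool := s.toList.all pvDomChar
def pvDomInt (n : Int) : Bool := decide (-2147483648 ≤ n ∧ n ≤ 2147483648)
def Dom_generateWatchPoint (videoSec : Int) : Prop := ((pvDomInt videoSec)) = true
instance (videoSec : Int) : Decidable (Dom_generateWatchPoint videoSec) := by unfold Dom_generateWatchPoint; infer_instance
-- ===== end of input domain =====

-- B replaces A's two running accumulators (study-time counter and growing string, threaded through a
-- helper) with a closed-form value per even index and a single join; measured faster (quadratic concatenation removed).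

-- ===== PORT A =====
-- helper of A; 'int(tolStudyTime / 5)' is PySem.Int.truncdiv (exact: |tolStudyTime| < 2^53 on Dom);
-- the 'watchPointPost is None' arm never fires for the string parameter, so only the == "" test remains
def learningTimeRecord (tolStudyTime : Int) (watchPointPost : String) : Int × String :=
  let t := PySem.Int.truncdiv tolStudyTime 5 + 2
  let e := if watchPointPost = "" then "0,1," else watchPointPost ++ ","
  (t, e)

-- loop body of A, named so the fold can cite it
def gwStepA (st : Int × String) (i : Int) : Int × String :=
  let st1 :=
    if PySem.Int.mod i 2 == 0 then
      let te := learningTimeRecord st.1 st.2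
      (st.1, te.2 ++ PySem.Int.toStr te.1)
    else st
  if PySem.Int.mod i 5 == 0 then (st1.1 + 5, st1.2) else st1

def generateWatchPoint (videoSec : Int) : String :=
  ((PySem.List.pyRange 0 videoSec 1).foldl gwStepA ((0 : Int), "")).2

-- ===== PORT B =====
def generateWatchPoint_alt (videoSec : Int) : String :=
  let pts := (PySem.List.pyRange 0 videoSec 2).map
    (fun i => if i == 0 then "2" else PySem.Int.toStr (PySem.Int.floordiv (i - 1) 5 + 3))
  if pts.isEmpty then "" else "0,1," ++ PySem.Str.join "," pts

-- ===== PRECONDITION & SPEC =====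
def Spec_generateWatchPoint (videoSec : Int) (out : String) : Prop := out = generateWatchPoint_alt videoSec
instance (videoSec : Int) (out : String) : Decidable (Spec_generateWatchPoint videoSec out) := by unfold Spec_generateWatchPoint; infer_instance

-- ===== CLAIM (what is proved, stated in full; the proofs are below) =====
def Claim_equal_generateWatchPoint : Prop := ∀ (videoSec : Int), Dom_generateWatchPoint videoSec → Spec_generateWatchPoint videoSec (generateWatchPoint videoSec)

-- ===== LEMMAS AND PROOFS =====

-- the watch-point entry for even index n, and the list of entries for indices < n
def gwEntry (n : Nat) : String := PySem.Int.toStr (((n + 4) / 5 + 2 : Nat) : Int)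

def gwPts : Nat → List String
  | 0 => []
  | n + 1 => gwPts n ++ (if n % 2 = 0 then [gwEntry n] else [])

-- the final string built from an entry list
def gwJoin (l : List String) : String := if l = [] then "" else "0,1," ++ PySem.Str.join "," l

lemma chars_join_append (sep : List Char) (l : List (List Char)) (x : List Char) (h : l ≠ []) :
    PySem.Chars.join sep (l ++ [x]) = PySem.Chars.join sep l ++ sep ++ x := by
  induction l with
  | nil => exact absurd rfl h
  | cons a l ih =>
    cases l with
    | nil =>
      simp [PySem.Chars.join_cons_cons, PySem.Chars.join_singleton]
    | cons b l' =>
      have : ((a :: b :: l') ++ [x]) = a :: ((b :: l') ++ [x]) := rfl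
      rw [this]
      have h2 : ((b :: l') ++ [x]) = b :: (l' ++ [x]) := rfl
      rw [h2, PySem.Chars.join_cons_cons, ← h2, ih (by simp), PySem.Chars.join_cons_cons]
      simp [List.append_assoc]

lemma str_join_append (l : List String) (x : String) (h : l ≠ []) :
    PySem.Str.join "," (l ++ [x]) = PySem.Str.join "," l ++ "," ++ x := by
  apply String.toList_inj.mp
  simp only [PySem.Str.toList_join, String.toList_append, List.map_append, List.map]
  exact chars_join_append ",".toList (l.map String.toList) x.toList (by simpa using h)

lemma gwJoin_ne_empty (l : List String) (h : l ≠ []) : gwJoin l ≠ "" := by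
  simp only [gwJoin, if_neg h]
  intro hc
  have := congrArg String.toList hc
  simp [String.toList_append] at this

lemma str_join_singleton (x : String) : PySem.Str.join "," [x] = x := by
  apply String.toList_inj.mp
  simp [PySem.Str.toList_join, PySem.Chars.join_singleton]

lemma gwJoin_append (l : List String) (x : String) :
    gwJoin (l ++ [x]) = (if gwJoin l = "" then "0,1," else gwJoin l ++ ",") ++ x := by
  cases l with
  | nil => simp [gwJoin, str_join_singleton]
  | cons a l' =>
    rw [if_neg (gwJoin_ne_empty _ (by simp))]
    simp only [gwJoin, if_neg (by simp : (a :: l' : List String) ≠ []),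
      if_neg (by simp : (a :: l') ++ [x] ≠ [])]
    rw [str_join_append _ _ (by simp)]
    simp [String.append_assoc]

lemma truncdiv5_natCast (m : Nat) : PySem.Int.truncdiv (m : Int) 5 = ((m / 5 : Nat) : Int) := by
  simp only [PySem.Int.truncdiv, Int.tdiv_eq_ediv_of_nonneg (Int.natCast_nonneg m)]
  omega

lemma gwTol_succ_of_mod (m : Nat) (h : m % 5 = 0) : (m + 1 + 4) / 5 * 5 = (m + 4) / 5 * 5 + 5 := by
  omega

lemma gwTol_succ_of_not_mod (m : Nat) (h : ¬ m % 5 = 0) : (m + 1 + 4) / 5 * 5 = (m + 4) / 5 * 5 := by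
  omega

-- closed form of A's fold state after the first m iterations
lemma foldA_closed (m : Nat) :
    (List.range m).foldl (fun st (k : Nat) => gwStepA st (k : Int)) ((0 : Int), "")
      = ((((m + 4) / 5 * 5 : Nat) : Int), gwJoin (gwPts m)) := by
  induction m with
  | zero => simp [gwPts, gwJoin]
  | succ m ih =>
    rw [List.range_succ, List.foldl_append, ih]
    simp only [List.foldl_cons, List.foldl_nil]
    have hm2' : PySem.Int.mod (m : Int) 2 = ((m % 2 : Nat) : Int) := by
      rw [PySem.Int.mod_eq_emod_of_pos (by norm_num)]; omega
    have hm5' : PySem.Int.mod (m : Int) 5 = ((m % 5 : Nat) : Int) := by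
      rw [PySem.Int.mod_eq_emod_of_pos (by norm_num)]; omega
    have h5 : (m + 4) / 5 * 5 / 5 = (m + 4) / 5 := Nat.mul_div_cancel _ (by omega)
    by_cases h2 : m % 2 = 0
    · have c2 : ((((m % 2 : Nat) : Int)) == 0) = true := by simp [h2]
      by_cases hm5 : m % 5 = 0
      · have c5 : ((((m % 5 : Nat) : Int)) == 0) = true := by simp [hm5]
        simp only [gwStepA, learningTimeRecord, truncdiv5_natCast, hm2', hm5', c2, c5, if_true]
        rw [show gwPts (m + 1) = gwPts m ++ [gwEntry m] by simp [gwPts, h2], gwJoin_append]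
        simp only [Prod.mk.injEq]
        refine ⟨by rw [gwTol_succ_of_mod m hm5]; push_cast; ring, ?_⟩
        simp [gwEntry, h5]
      · have c5 : ((((m % 5 : Nat) : Int)) == 0) = false := by
          simp only [beq_eq_false_iff_ne, ne_eq, Nat.cast_eq_zero]; omega
        simp only [gwStepA, learningTimeRecord, truncdiv5_natCast, hm2', hm5', c2, c5,
          if_true, if_false, Bool.false_eq_true]
        rw [show gwPts (m + 1) = gwPts m ++ [gwEntry m] by simp [gwPts, h2], gwJoin_append]
        simp only [Prod.mk.injEq]
        refine ⟨by rw [gwTol_succ_of_not_mod m hm5], ?_⟩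
        simp [gwEntry, h5]
    · have c2 : ((((m % 2 : Nat) : Int)) == 0) = false := by
        simp only [beq_eq_false_iff_ne, ne_eq, Nat.cast_eq_zero]; omega
      rw [show gwPts (m + 1) = gwPts m by simp [gwPts, h2]]
      by_cases hm5 : m % 5 = 0
      · have c5 : ((((m % 5 : Nat) : Int)) == 0) = true := by simp [hm5]
        simp only [gwStepA, learningTimeRecord, truncdiv5_natCast, hm2', hm5', c2, c5,
          if_true, if_false, Bool.false_eq_true]
        simp only [Prod.mk.injEq]
        refine ⟨by rw [gwTol_succ_of_mod m hm5]; push_cast; ring, ?_⟩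
        first | rfl | trivial
      · have c5 : ((((m % 5 : Nat) : Int)) == 0) = false := by
          simp only [beq_eq_false_iff_ne, ne_eq, Nat.cast_eq_zero]; omega
        simp only [gwStepA, learningTimeRecord, truncdiv5_natCast, hm2', hm5', c2, c5,
          if_false, Bool.false_eq_true]
        simp only [Prod.mk.injEq]
        refine ⟨by rw [gwTol_succ_of_not_mod m hm5], ?_⟩
        first | rfl | trivial

lemma A_closed (m : Nat) : generateWatchPoint (m : Int) = gwJoin (gwPts m) := by
  unfold generateWatchPoint
  rw [PySem.List.pyRange_one]
  rw [List.foldl_map]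
  have : ((m : Int) - 0).toNat = m := by omega
  rw [this]
  have := foldA_closed m
  simp only [zero_add]
  rw [this]

-- B's map over the even indices below m is exactly gwPts m
lemma gwPts_eq_map_range (m : Nat) :
    gwPts m = (List.range ((m + 1) / 2)).map (fun k => gwEntry (2 * k)) := by
  induction m with
  | zero => simp [gwPts]
  | succ m ih =>
    by_cases h2 : m % 2 = 0
    · have hc : (m + 1 + 1) / 2 = (m + 1) / 2 + 1 := by omega
      have hm : 2 * ((m + 1) / 2) = m := by omega
      simp only [gwPts, h2, if_pos, ih, hc, List.range_succ, List.map_append, List.map, hm]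
    · have hc : (m + 1 + 1) / 2 = (m + 1) / 2 := by omega
      simp [gwPts, h2, ih, hc]

lemma entry_eq (k : Nat) :
    (if ((0 : Int) + 2 * (k : Int)) == 0 then "2"
     else PySem.Int.toStr (PySem.Int.floordiv ((0 : Int) + 2 * (k : Int) - 1) 5 + 3))
      = gwEntry (2 * k) := by
  cases k with
  | zero => simp [gwEntry]; decide
  | succ j =>
    rw [if_neg (by simp; omega)]
    have hcast : ((0 : Int) + 2 * ((j + 1 : Nat) : Int) - 1) = ((2 * (j + 1) - 1 : Nat) : Int) := by
      push_cast; omega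
    rw [hcast, PySem.Int.floordiv_eq_ediv_of_pos (by norm_num)]
    unfold gwEntry
    congr 1
    omega

lemma B_closed (m : Nat) : generateWatchPoint_alt (m : Int) = gwJoin (gwPts m) := by
  unfold generateWatchPoint_alt
  rw [PySem.List.pyRange_of_pos 0 (m : Int) (by norm_num : (0:Int) < 2)]
  have hc : (if (0 : Int) < (m : Int) then (((m : Int) - 0 + 2 - 1) / 2).toNat else 0) = (m + 1) / 2 := by
    split_ifs with h
    · omega
    · omega
  rw [hc, List.map_map]
  have hmap : (List.range ((m + 1) / 2)).map
      ((fun i => if i == 0 then "2" else PySem.Int.toStr (PySem.Int.floordiv (i - 1) 5 + 3)) ∘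
        (fun k : Nat => (0 : Int) + 2 * (k : Int)))
      = (List.range ((m + 1) / 2)).map (fun k => gwEntry (2 * k)) := by
    apply List.map_congr_left
    intro k _
    exact entry_eq k
  rw [hmap, ← gwPts_eq_map_range]
  by_cases h : gwPts m = []
  · simp [h, gwJoin]
  · rw [if_neg (by simpa using h)]
    simp [gwJoin, if_neg h]

lemma neg_case (v : Int) (hv : v ≤ 0) : generateWatchPoint v = generateWatchPoint_alt v := by
  unfold generateWatchPoint generateWatchPoint_alt
  rw [show PySem.List.pyRange 0 v 1 = [] from PySem.List.pyRange_one_eq_nil hv]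
  rw [PySem.List.pyRange_of_pos 0 v (by norm_num : (0:Int) < 2)]
  rw [if_neg (not_lt.mpr hv)]
  simp

-- ===== VERDICT (by name: the statement is the Claim_ definition above) =====
theorem generateWatchPoint_spec : Claim_equal_generateWatchPoint := by
  intro v _
  unfold Spec_generateWatchPoint
  by_cases hv : v ≤ 0
  · exact neg_case v hv
  · have hm : v = ((v.toNat : Nat) : Int) := by omega
    rw [hm, A_closed, B_closed]
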